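-- pv_equiv track=rewrite | github.com/QitaoXu/Lintcode | interviews/MS/excelColNum.py | n_to_digits
-- ===== SOURCE A (Python) =====
-- def n_to_digits(n):
--
--     digits = []
--
--     while n > 0:
--
--         n -= 1
--
--         digit = n % 26
--
--         digits.append(digit)
--
--         n = n // 26
--
--     digits.reverse()
--
--     return digits
-- ===== SOURCE B (Python) =====
-- def n_to_digits(n):
--     if n <= 0:
--         return []
--     n -= 1
--     return n_to_digits(n // 26) + [n % 26]
-- ===== Notes on version B (the rewrite author's own statement) =====
-- stated objective: simpler
-- what changed: Replaces the while loop with an append-then-reverse accumulator by a direct recursion over the quotient that emits digits most-significant first, eliminating the explicit list reversal.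
import Mathlib
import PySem

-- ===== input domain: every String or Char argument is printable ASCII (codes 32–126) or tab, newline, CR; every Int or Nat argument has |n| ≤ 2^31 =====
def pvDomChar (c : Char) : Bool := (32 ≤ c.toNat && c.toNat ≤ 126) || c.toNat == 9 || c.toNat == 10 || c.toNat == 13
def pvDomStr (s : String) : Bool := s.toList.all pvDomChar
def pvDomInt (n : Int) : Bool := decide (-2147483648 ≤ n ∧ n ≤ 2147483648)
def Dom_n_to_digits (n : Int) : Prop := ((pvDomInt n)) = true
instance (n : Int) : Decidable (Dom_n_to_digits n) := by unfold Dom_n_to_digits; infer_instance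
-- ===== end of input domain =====

-- B replaces A's while-loop + final reverse by a direct recursion emitting digits
-- most-significant first (objective: simpler; same cost).

-- termination measure lemma used by both ports' recursions
theorem pvFloordivLt (n : Int) (h : 0 < n) :
    (PySem.Int.floordiv (n - 1) 26).toNat < n.toNat := by
  have h26 : (0:Int) < 26 := by norm_num
  rw [PySem.Int.floordiv_eq_ediv_of_pos h26]
  have h1 : 0 ≤ (n - 1) / 26 := Int.ediv_nonneg (by omega) (by omega)
  have h2 : (n - 1) / 26 ≤ n - 1 := Int.ediv_le_self _ (by omega)
  omega

-- ===== PORT A =====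
-- the while loop: state (n, digits); digits appended least-significant first
def n_to_digits_loopA (n : Int) (digits : List Int) : List Int :=
  if h : n > 0 then
    n_to_digits_loopA (PySem.Int.floordiv (n - 1) 26)
      (digits ++ [PySem.Int.mod (n - 1) 26])
  else digits
termination_by n.toNat
decreasing_by exact pvFloordivLt n h

def n_to_digits (n : Int) : List Int :=
  (n_to_digits_loopA n []).reverse

-- ===== PORT B =====
def n_to_digits_alt (n : Int) : List Int :=
  if h : n ≤ 0 then []
  else
    n_to_digits_alt (PySem.Int.floordiv (n - 1) 26) ++ [PySem.Int.mod (n - 1) 26]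
termination_by n.toNat
decreasing_by exact pvFloordivLt n (by omega)

-- ===== PRECONDITION & SPEC =====
def Spec_n_to_digits (n : Int) (out : List Int) : Prop := out = n_to_digits_alt n
instance (n : Int) (out : List Int) : Decidable (Spec_n_to_digits n out) := by unfold Spec_n_to_digits; infer_instance

-- ===== CLAIM (what is proved, stated in full; the proofs are below) =====
def Claim_equal_n_to_digits : Prop := ∀ (n : Int), Dom_n_to_digits n → Spec_n_to_digits n (n_to_digits n)

-- ===== LEMMAS AND PROOFS =====

theorem loopA_eq_alt (n : Int) (acc : List Int) :
    n_to_digits_loopA n acc = acc ++ (n_to_digits_alt n).reverse := by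
  by_cases h : n > 0
  · rw [n_to_digits_loopA, dif_pos h, n_to_digits_alt, dif_neg (by omega)]
    rw [loopA_eq_alt (PySem.Int.floordiv (n - 1) 26)]
    simp
  · rw [n_to_digits_loopA, dif_neg h, n_to_digits_alt, dif_pos (by omega)]
    simp
termination_by n.toNat
decreasing_by exact pvFloordivLt n h

-- ===== VERDICT (by name: the statement is the Claim_ definition above) =====
theorem n_to_digits_spec : Claim_equal_n_to_digits := by
  intro n _
  unfold Spec_n_to_digits n_to_digits
  rw [loopA_eq_alt]
  simp
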